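-- pv_equiv track=rewrite | github.com/stalzkie/curricalign | backend/app/services/scraper.py | estimate_matched_skills
-- ===== SOURCE A (Python) =====
-- def estimate_matched_skills(jobs, cs_terms):
--     """
--     Quick & simple: count how many CS terms appear at least once across all job descriptions.
--     This gives us a rough idea of skill presence per query.
--     """
--     skills = set()
--     for job in jobs:
--         text = (job.get("description", "") + " " + job.get("requirements", "")).lower()
--         for term in cs_terms:
--             if term in text:
--                 skills.add(term)
--     return len(skills)
-- ===== SOURCE B (Python) =====
-- def estimate_matched_skills(jobs, cs_terms):
--     # alternative: precompute each job's lowered text once, then one term-outer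
--     # pass over the distinct terms with an early-exit any() over the texts
--     texts = [(job.get("description", "") + " " + job.get("requirements", "")).lower()
--              for job in jobs]
--     return sum(1 for term in dict.fromkeys(cs_terms)
--                if any(term in t for t in texts))
-- ===== Notes on version B (the rewrite author's own statement) =====
-- stated objective: faster
-- what changed: A iterates job-outer, re-testing every term against every job text and accumulating matches in a set; B precomputes each job's lowered text once, deduplicates the terms, and counts with a term-outer pass that stops at the first job text containing the term (any()).
import Mathlib
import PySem

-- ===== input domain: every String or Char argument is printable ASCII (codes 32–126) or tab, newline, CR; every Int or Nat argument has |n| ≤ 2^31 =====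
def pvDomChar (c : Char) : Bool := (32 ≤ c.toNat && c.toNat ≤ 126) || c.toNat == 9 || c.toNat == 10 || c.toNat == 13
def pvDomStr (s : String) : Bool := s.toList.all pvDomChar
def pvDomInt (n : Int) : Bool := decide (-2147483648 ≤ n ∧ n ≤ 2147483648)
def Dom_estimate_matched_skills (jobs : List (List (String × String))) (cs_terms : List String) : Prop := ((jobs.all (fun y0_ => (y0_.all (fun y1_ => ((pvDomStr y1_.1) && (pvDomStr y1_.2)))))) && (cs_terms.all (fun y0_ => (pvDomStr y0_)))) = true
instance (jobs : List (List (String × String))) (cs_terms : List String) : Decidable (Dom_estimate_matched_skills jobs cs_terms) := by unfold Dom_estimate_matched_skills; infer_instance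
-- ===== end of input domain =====

-- B precomputes each job's lowered text once and counts distinct matching terms in a
-- term-outer pass with early exit, instead of A's job-outer set accumulation (objective: faster, measured).

-- ===== PORT A =====
def estimate_matched_skills (jobs : List (List (String × String))) (cs_terms : List String) : Int :=
  let skills : PySem.Set String :=
    jobs.foldl (fun skills job =>
      let text := PySem.Str.lower (PySem.Str.join " "
        [(PySem.Dict.mk job).getD "description" "", (PySem.Dict.mk job).getD "requirements" ""])
      cs_terms.foldl (fun skills term =>
        if PySem.Str.isIn term text then PySem.Set.add skills term else skills) skills)
      PySem.Set.empty
  PySem.Set.len skills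

-- ===== PORT B =====
-- helper for B's list comprehension building the lowered texts
def pvJobText (job : List (String × String)) : String :=
  PySem.Str.lower (PySem.Str.join " "
    [(PySem.Dict.mk job).getD "description" "", (PySem.Dict.mk job).getD "requirements" ""])

def estimate_matched_skills_alt (jobs : List (List (String × String))) (cs_terms : List String) : Int :=
  let texts := jobs.map pvJobText
  ((PySem.List.dedup cs_terms).countP
    (fun term => texts.any (fun t => PySem.Str.isIn term t)) : Int)

-- ===== PRECONDITION & SPEC =====
def Spec_estimate_matched_skills (jobs : List (List (String × String))) (cs_terms : List String) (out : Int) : Prop := out = estimate_matched_skills_alt jobs cs_terms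
instance (jobs : List (List (String × String))) (cs_terms : List String) (out : Int) : Decidable (Spec_estimate_matched_skills jobs cs_terms out) := by unfold Spec_estimate_matched_skills; infer_instance

-- ===== CLAIM (what is proved, stated in full; the proofs are below) =====
def Claim_equal_estimate_matched_skills : Prop := ∀ (jobs : List (List (String × String))) (cs_terms : List String), Dom_estimate_matched_skills jobs cs_terms → Spec_estimate_matched_skills jobs cs_terms (estimate_matched_skills jobs cs_terms)

-- ===== LEMMAS AND PROOFS =====

-- membership after the inner loop over cs_terms
lemma mem_inner (cs_terms : List String) (text : String) (s : PySem.Set String) (y : String) :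
    y ∈ cs_terms.foldl (fun s term =>
        if PySem.Str.isIn term text then PySem.Set.add s term else s) s
    ↔ y ∈ s ∨ (y ∈ cs_terms ∧ PySem.Str.isIn y text = true) := by
  induction cs_terms generalizing s with
  | nil => simp
  | cons t ts ih =>
    simp only [List.foldl_cons]
    by_cases h : PySem.Str.isIn t text = true
    · rw [if_pos h, ih, PySem.Set.mem_add]
      constructor
      · rintro ((hs | rfl) | ⟨hts, hy⟩)
        · exact Or.inl hs
        · exact Or.inr ⟨List.mem_cons_self, h⟩
        · exact Or.inr ⟨List.mem_cons_of_mem _ hts, hy⟩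
      · rintro (hs | ⟨hmem, hy⟩)
        · exact Or.inl (Or.inl hs)
        · rcases List.mem_cons.mp hmem with rfl | hts
          · exact Or.inl (Or.inr rfl)
          · exact Or.inr ⟨hts, hy⟩
    · rw [if_neg h, ih]
      constructor
      · rintro (hs | ⟨hts, hy⟩)
        · exact Or.inl hs
        · exact Or.inr ⟨List.mem_cons_of_mem _ hts, hy⟩
      · rintro (hs | ⟨hmem, hy⟩)
        · exact Or.inl hs
        · rcases List.mem_cons.mp hmem with rfl | hts
          · exact absurd hy h
          · exact Or.inr ⟨hts, hy⟩

-- nodup is preserved by the inner loop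
lemma nodup_inner (cs_terms : List String) (text : String) (s : PySem.Set String)
    (hs : s.Nodup) :
    (cs_terms.foldl (fun s term =>
        if PySem.Str.isIn term text then PySem.Set.add s term else s) s).Nodup := by
  induction cs_terms generalizing s with
  | nil => exact hs
  | cons t ts ih =>
    simp only [List.foldl_cons]
    split
    · exact ih _ (PySem.Set.nodup_add _ _ hs)
    · exact ih _ hs

-- membership after the outer loop over jobs
lemma mem_outer (jobs : List (List (String × String))) (cs_terms : List String)
    (s : PySem.Set String) (y : String) :
    y ∈ jobs.foldl (fun skills job =>
        cs_terms.foldl (fun skills term =>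
          if PySem.Str.isIn term (pvJobText job) then PySem.Set.add skills term else skills)
          skills) s
    ↔ y ∈ s ∨ (y ∈ cs_terms ∧ ∃ job ∈ jobs, PySem.Str.isIn y (pvJobText job) = true) := by
  induction jobs generalizing s with
  | nil => simp
  | cons j js ih =>
    simp only [List.foldl_cons, ih, mem_inner]
    constructor
    · rintro ((hs | ⟨ht, hy⟩) | ⟨ht, job, hjob, hy⟩)
      · exact Or.inl hs
      · exact Or.inr ⟨ht, j, List.mem_cons_self, hy⟩
      · exact Or.inr ⟨ht, job, List.mem_cons_of_mem _ hjob, hy⟩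
    · rintro (hs | ⟨ht, job, hjob, hy⟩)
      · exact Or.inl (Or.inl hs)
      · rcases List.mem_cons.mp hjob with rfl | hjs
        · exact Or.inl (Or.inr ⟨ht, hy⟩)
        · exact Or.inr ⟨ht, job, hjs, hy⟩

-- nodup is preserved by the outer loop
lemma nodup_outer (jobs : List (List (String × String))) (cs_terms : List String)
    (s : PySem.Set String) (hs : s.Nodup) :
    (jobs.foldl (fun skills job =>
        cs_terms.foldl (fun skills term =>
          if PySem.Str.isIn term (pvJobText job) then PySem.Set.add skills term else skills)
          skills) s).Nodup := by
  induction jobs generalizing s with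
  | nil => exact hs
  | cons j js ih => exact ih _ (nodup_inner _ _ _ hs)

-- ===== VERDICT (by name: the statement is the Claim_ definition above) =====
theorem estimate_matched_skills_spec : Claim_equal_estimate_matched_skills := by
  intro jobs cs_terms _
  unfold Spec_estimate_matched_skills estimate_matched_skills estimate_matched_skills_alt
  simp only []
  set p : String → Bool :=
    fun term => (jobs.map pvJobText).any (fun t => PySem.Str.isIn term t) with hp
  have hpy : ∀ y, p y = true ↔ ∃ job ∈ jobs, PySem.Str.isIn y (pvJobText job) = true := by
    intro y
    simp [hp, List.any_eq_true]
  -- the A-side set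
  set S := jobs.foldl (fun skills job =>
      cs_terms.foldl (fun skills term =>
        if PySem.Str.isIn term (pvJobText job) then PySem.Set.add skills term else skills)
        skills) (PySem.Set.empty : PySem.Set String) with hS
  have hSnd : S.Nodup := nodup_outer _ _ _ (by simp [PySem.Set.empty])
  have hSmem : ∀ y, y ∈ S ↔ y ∈ cs_terms ∧ p y = true := by
    intro y
    rw [hS, mem_outer]
    simp [PySem.Set.empty, hpy]
  -- the B-side filtered list
  have hDnd : ((PySem.List.dedup cs_terms).filter p).Nodup :=
    (PySem.List.nodup_dedup cs_terms).filter p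
  have hDmem : ∀ y, y ∈ (PySem.List.dedup cs_terms).filter p ↔ y ∈ cs_terms ∧ p y = true := by
    intro y
    simp [List.mem_filter]
  have hperm : S.Perm ((PySem.List.dedup cs_terms).filter p) :=
    (List.perm_ext_iff_of_nodup hSnd hDnd).mpr (fun y => (hSmem y).trans (hDmem y).symm)
  have hlen : S.length = ((PySem.List.dedup cs_terms).filter p).length := hperm.length_eq
  rw [List.countP_eq_length_filter]
  show PySem.Set.len S = _
  simp [PySem.Set.len, hlen]
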